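-- pv_equiv track=rewrite | github.com/khandelwalsumit/AgenticAnalytics | utils/section_splitter.py | _classify_block
-- ===== SOURCE A (Python) =====
-- from typing import Any
--
-- _SECTION_TYPE_MAP = {
--     "executive_summary": "exec_summary",
--     "pain_point": "exec_summary",
--     "quick_wins": "exec_summary",
--     "matrix": "impact",
--     "matrix_bet": "impact",
--     "recommendations": "impact",
--     "recommendations_digital": "impact",
--     "recommendations_ops": "impact",
--     "recommendations_comms": "impact",
--     "recommendations_policy": "impact",
--     "theme_divider": "theme_deep_dives",
--     "theme_narrative": "theme_deep_dives",
--     "theme_drivers": "theme_deep_dives",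
--     "theme_consequence": "theme_deep_dives",
-- }
--
-- def _classify_block(block: dict[str, Any]) -> str:
--     """Classify a slide block into one of the 3 sections."""
--     st = block["section_type"].lower().strip()
--     if st in _SECTION_TYPE_MAP:
--         return _SECTION_TYPE_MAP[st]
--
--     # Fuzzy matching for edge cases
--     if any(k in st for k in ("exec", "summary", "hook", "situation", "pain", "quick")):
--         return "exec_summary"
--     if any(k in st for k in ("matrix", "impact", "ease", "bet", "recommend", "action")):
--         return "impact"
--     if any(k in st for k in ("theme", "deep", "dive", "driver", "consequence")):
--         return "theme_deep_dives"
--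
--     return "theme_deep_dives"  # default: deep dives catch-all
-- ===== SOURCE B (Python) =====
-- from typing import Any
--
-- def _classify_block(block: dict[str, Any]) -> str:
--     """Classify a slide block into one of the 3 sections (fuzzy scans only)."""
--     st = block["section_type"].lower().strip()
--     if any(k in st for k in ("exec", "summary", "hook", "situation", "pain", "quick")):
--         return "exec_summary"
--     if any(k in st for k in ("matrix", "impact", "ease", "bet", "recommend", "action")):
--         return "impact"
--     return "theme_deep_dives"
-- ===== Notes on version B (the rewrite author's own statement) =====
-- stated objective: simpler
-- what changed: Dropped the 14-entry _SECTION_TYPE_MAP exact-match table and the redundant third keyword scan: B classifies with just the two ordered fuzzy substring scans plus the theme_deep_dives catch-all, which provably assign every table key its mapped value.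
import Mathlib
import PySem

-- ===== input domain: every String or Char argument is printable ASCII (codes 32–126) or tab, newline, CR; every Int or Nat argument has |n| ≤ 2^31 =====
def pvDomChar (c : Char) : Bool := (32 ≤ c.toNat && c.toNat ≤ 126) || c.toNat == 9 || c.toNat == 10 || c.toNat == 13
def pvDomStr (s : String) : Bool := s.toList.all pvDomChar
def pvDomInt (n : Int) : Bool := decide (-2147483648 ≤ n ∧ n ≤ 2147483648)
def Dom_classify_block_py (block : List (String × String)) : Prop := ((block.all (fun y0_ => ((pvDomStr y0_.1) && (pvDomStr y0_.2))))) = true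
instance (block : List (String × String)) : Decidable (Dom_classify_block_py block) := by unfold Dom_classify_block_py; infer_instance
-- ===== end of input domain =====

-- B drops the `_SECTION_TYPE_MAP` exact-match table (every key is classified identically by the
-- fuzzy substring scans) and the redundant theme scan, keeping only the two ordered keyword scans.


-- ===== PORT A =====
def sectionTypeMap : PySem.Dict String String := PySem.Dict.mk
  [("executive_summary", "exec_summary"),
   ("pain_point", "exec_summary"),
   ("quick_wins", "exec_summary"),
   ("matrix", "impact"),
   ("matrix_bet", "impact"),
   ("recommendations", "impact"),
   ("recommendations_digital", "impact"),
   ("recommendations_ops", "impact"),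
   ("recommendations_comms", "impact"),
   ("recommendations_policy", "impact"),
   ("theme_divider", "theme_deep_dives"),
   ("theme_narrative", "theme_deep_dives"),
   ("theme_drivers", "theme_deep_dives"),
   ("theme_consequence", "theme_deep_dives")]

-- A's body after computing st: exact-match table first, then the three fuzzy scans.
def classifyFromA (st : String) : String :=
  match sectionTypeMap.get? st with
  | some v => v
  | none =>
    if ["exec", "summary", "hook", "situation", "pain", "quick"].any (fun k => PySem.Str.isIn k st) then
      "exec_summary"
    else if ["matrix", "impact", "ease", "bet", "recommend", "action"].any (fun k => PySem.Str.isIn k st) then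
      "impact"
    else if ["theme", "deep", "dive", "driver", "consequence"].any (fun k => PySem.Str.isIn k st) then
      "theme_deep_dives"
    else
      "theme_deep_dives"

def classify_block_py (block : List (String × String)) : String :=
  classifyFromA (PySem.Str.strip (PySem.Str.lower (((PySem.Dict.mk block).get? "section_type").getD "")))

-- ===== PORT B =====
-- B's body after computing st: only the two ordered fuzzy scans, with the catch-all default.
def classifyFromB (st : String) : String :=
  if ["exec", "summary", "hook", "situation", "pain", "quick"].any (fun k => PySem.Str.isIn k st) then
    "exec_summary"
  else if ["matrix", "impact", "ease", "bet", "recommend", "action"].any (fun k => PySem.Str.isIn k st) then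
    "impact"
  else
    "theme_deep_dives"

def classify_block_py_alt (block : List (String × String)) : String :=
  classifyFromB (PySem.Str.strip (PySem.Str.lower (((PySem.Dict.mk block).get? "section_type").getD "")))

-- ===== PRECONDITION & SPEC =====
-- Pre_ excludes only blocks without a "section_type" key, on which Python A raises KeyError.
def Pre_classify_block_py (block : List (String × String)) : Prop :=
  "section_type" ∈ block.map Prod.fst
instance (block : List (String × String)) : Decidable (Pre_classify_block_py block) := by unfold Pre_classify_block_py; infer_instance

def pvWitness_classify_block_py : (List (String × String)) := [("section_type", "Matrix_Bet")]

def Spec_classify_block_py (block : List (String × String)) (out : String) : Prop := out = classify_block_py_alt block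
instance (block : List (String × String)) (out : String) : Decidable (Spec_classify_block_py block out) := by unfold Spec_classify_block_py; infer_instance

-- ===== CLAIM (what is proved, stated in full; the proofs are below) =====
def Claim_equal_classify_block_py : Prop := ∀ (block : List (String × String)), Dom_classify_block_py block → Pre_classify_block_py block → Spec_classify_block_py block (classify_block_py block)

-- ===== LEMMAS AND PROOFS =====

-- Core facts specific to these two programs.

-- A's table returns `none` unless st is one of its 14 literal keys.
theorem lookup_cases (st : String) :
    sectionTypeMap.get? st = none ∨
      st ∈ ["executive_summary", "pain_point", "quick_wins", "matrix", "matrix_bet", "recommendations", "recommendations_digital", "recommendations_ops", "recommendations_comms", "recommendations_policy", "theme_divider", "theme_narrative", "theme_drivers", "theme_consequence"] := by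
  by_cases h : st ∈ ["executive_summary", "pain_point", "quick_wins", "matrix", "matrix_bet", "recommendations", "recommendations_digital", "recommendations_ops", "recommendations_comms", "recommendations_policy", "theme_divider", "theme_narrative", "theme_drivers", "theme_consequence"]
  · exact Or.inr h
  · refine Or.inl ?_
    rw [PySem.Dict.get?_eq_none_iff_not_mem_keys]
    simpa [sectionTypeMap, PySem.Dict.keys_mk] using h

set_option maxHeartbeats 1600000 in
-- For ANY looked-up string, A's table-then-fuzzy chain agrees with B's fuzzy-only chain.
theorem classify_core_agree (st : String) : classifyFromA st = classifyFromB st := by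
  unfold classifyFromA classifyFromB
  rcases lookup_cases st with h | h
  · rw [h]
    split_ifs <;> rfl
  · fin_cases h <;> decide

-- ===== VERDICT (by name: the statement is the Claim_ definition above) =====
theorem classify_block_py_spec : Claim_equal_classify_block_py := by
  intro block _ _
  unfold Spec_classify_block_py classify_block_py classify_block_py_alt
  exact classify_core_agree _
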